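-- pv_equiv track=rewrite | github.com/raoagbajdos/excel-opus-py-converter | opus-excel-vba-py-converter/offline_converter.py | _preprocess
-- ===== SOURCE A (Python) =====
-- def _preprocess(vba: str) -> list[str]:
--     """Normalise VBA source into a list of logical lines."""
--     # Strip Attribute lines
--     lines = [l for l in vba.splitlines()
--              if not l.strip().startswith("Attribute ")]
--     # Join line continuations
--     joined: list[str] = []
--     buf = ""
--     for line in lines:
--         stripped = line.rstrip()
--         if stripped.endswith(" _"):
--             buf += stripped[:-2].rstrip() + " "
--         else:
--             buf += stripped
--             joined.append(buf)
--             buf = ""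
--     if buf:
--         joined.append(buf)
--     return joined
-- ===== SOURCE B (Python) =====
-- def _preprocess(vba: str) -> list[str]:
--     """Normalise VBA source into a list of logical lines (single reverse pass)."""
--     out = []  # logical lines, last-to-first; each is its list of pieces, reversed
--     for line in reversed(vba.splitlines()):
--         if line.strip().startswith("Attribute "):
--             continue
--         s = line.rstrip()
--         if s.endswith(" _"):
--             piece = s[:-2].rstrip() + " "
--             if out:
--                 out[-1].append(piece)
--             else:
--                 out.append([piece])
--         else:
--             out.append([s])
--     return ["".join(reversed(p)) for p in reversed(out)]
-- ===== Notes on version B (the rewrite author's own statement) =====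
-- stated objective: alternative
-- what changed: Replaces A's filter pass plus forward fold over a stateful string buffer (with a trailing flush) by a single reverse pass that filters inline and merges each continuation piece into the logical line being built, joining the pieces at the end.
import Mathlib
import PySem

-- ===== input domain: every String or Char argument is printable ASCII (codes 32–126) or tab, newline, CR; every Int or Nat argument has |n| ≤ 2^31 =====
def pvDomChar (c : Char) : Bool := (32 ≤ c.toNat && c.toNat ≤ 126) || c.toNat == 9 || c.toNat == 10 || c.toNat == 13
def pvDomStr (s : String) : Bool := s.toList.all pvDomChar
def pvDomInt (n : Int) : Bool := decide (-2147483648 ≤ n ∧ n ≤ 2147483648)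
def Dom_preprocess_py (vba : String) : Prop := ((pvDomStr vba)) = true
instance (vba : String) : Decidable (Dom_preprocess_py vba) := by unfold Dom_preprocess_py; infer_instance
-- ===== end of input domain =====

-- B replaces A's forward fold over a separate stateful buffer by a single reverse pass that
-- filters, merges continuation pieces into the logical line being built and joins at the end
-- (objective: alternative decomposition, same cost).

-- ===== PORT A =====
-- literal transliteration of _preprocess: filter comprehension, then a forward loop over
-- (joined, buf), then the trailing 'if buf' append.
def preprocess_py (vba : String) : List String :=
  let lines : List (List Char) :=
    (PySem.Chars.splitlines vba.toList).filter
      (fun l => !(PySem.Chars.startswith (PySem.Chars.strip l) ("Attribute ".toList)))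
  let st : List (List Char) × List Char :=
    lines.foldl
      (fun st line =>
        let stripped := PySem.Chars.rstrip line
        if PySem.Chars.endswith stripped (" _".toList) then
          (st.1, st.2 ++ PySem.Chars.rstrip (PySem.List.slice stripped none (some (-2))) ++ [' '])
        else
          (st.1 ++ [st.2 ++ stripped], []))
      ([], [])
  let joined := if st.2 ≠ [] then st.1 ++ [st.2] else st.1
  joined.map String.ofList

-- ===== PORT B =====
-- literal transliteration of Source B: one loop over reversed(splitlines) keeping a list of
-- logical lines (last-to-first), each as its reversed list of pieces; decode at the end.
def preprocess_py_alt (vba : String) : List String :=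
  let out : List (List (List Char)) :=
    (PySem.Chars.splitlines vba.toList).reverse.foldl
      (fun out line =>
        if PySem.Chars.startswith (PySem.Chars.strip line) ("Attribute ".toList) then out
        else
          let s := PySem.Chars.rstrip line
          if PySem.Chars.endswith s (" _".toList) then
            let piece := PySem.Chars.rstrip (PySem.List.slice s none (some (-2))) ++ [' ']
            match out with
            | [] => [[piece]]
            | _ :: _ => out.dropLast ++ [out.getLast! ++ [piece]]   -- out[-1].append(piece)
          else out ++ [[s]])
      []
  (out.reverse.map (fun p => PySem.Chars.join [] p.reverse)).map String.ofList

-- ===== PRECONDITION & SPEC =====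
def Spec_preprocess_py (vba : String) (out : List String) : Prop := out = preprocess_py_alt vba
instance (vba : String) (out : List String) : Decidable (Spec_preprocess_py vba out) := by unfold Spec_preprocess_py; infer_instance

-- ===== CLAIM (what is proved, stated in full; the proofs are below) =====
def Claim_equal_preprocess_py : Prop := ∀ (vba : String), Dom_preprocess_py vba → Spec_preprocess_py vba (preprocess_py vba)

-- ===== LEMMAS AND PROOFS =====

-- the continuation piece a line contributes
def pvCore (s : List Char) : List Char :=
  PySem.Chars.rstrip (PySem.List.slice s none (some (-2))) ++ [' ']

-- prepend a piece to the first logical line (creating it if none)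
def pvMerge (c : List Char) : List (List Char) → List (List Char)
  | [] => [c]
  | x :: xs => (c ++ x) :: xs

-- the common specification: the logical lines of an (already filtered) line list
def pvLogical : List (List Char) → List (List Char)
  | [] => []
  | l :: ls =>
    if PySem.Chars.endswith (PySem.Chars.rstrip l) (" _".toList) then
      pvMerge (pvCore (PySem.Chars.rstrip l)) (pvLogical ls)
    else PySem.Chars.rstrip l :: pvLogical ls

def pvPrepend (b : List Char) (xs : List (List Char)) : List (List Char) :=
  match xs with
  | [] => if b ≠ [] then [b] else []
  | x :: r => (b ++ x) :: r

theorem pvPrepend_nil (xs : List (List Char)) : pvPrepend [] xs = xs := by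
  cases xs <;> simp [pvPrepend]

theorem pvPrepend_merge (b c : List Char) (hc : c ≠ []) (xs : List (List Char)) :
    pvPrepend (b ++ c) xs = pvPrepend b (pvMerge c xs) := by
  cases xs with
  | nil => simp [pvPrepend, pvMerge, hc]
  | cons x r => simp [pvPrepend, pvMerge]

-- A's loop computes pvLogical (with the trailing-buffer flush)
theorem pvAfold (ls : List (List Char)) (joined : List (List Char)) (buf : List Char) :
    (let st := ls.foldl
      (fun (st : List (List Char) × List Char) line =>
        let stripped := PySem.Chars.rstrip line
        if PySem.Chars.endswith stripped (" _".toList) then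
          (st.1, st.2 ++ PySem.Chars.rstrip (PySem.List.slice stripped none (some (-2))) ++ [' '])
        else
          (st.1 ++ [st.2 ++ stripped], []))
      (joined, buf)
     if st.2 ≠ [] then st.1 ++ [st.2] else st.1)
    = joined ++ pvPrepend buf (pvLogical ls) := by
  induction ls generalizing joined buf with
  | nil =>
    by_cases hb : buf = [] <;> simp [pvLogical, pvPrepend, hb]
  | cons l ls ih =>
    by_cases hc : PySem.Chars.endswith (PySem.Chars.rstrip l) (" _".toList)
    · simp only [List.foldl_cons, pvLogical, hc, if_true]
      rw [ih]
      rw [show buf ++ PySem.Chars.rstrip (PySem.List.slice (PySem.Chars.rstrip l) none (some (-2))) ++ [' ']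
            = buf ++ pvCore (PySem.Chars.rstrip l) by simp [pvCore]]
      rw [pvPrepend_merge _ _ (by simp [pvCore])]
    · simp only [List.foldl_cons, pvLogical, hc, Bool.false_eq_true, if_false]
      rw [ih, pvPrepend_nil]
      simp [pvPrepend]

-- decode B's state
def pvDecode (out : List (List (List Char))) : List (List Char) :=
  out.reverse.map (fun p => PySem.Chars.join [] p.reverse)

theorem pvJoin_nil_eq_flatten (p : List (List Char)) : PySem.Chars.join [] p = p.flatten := by
  have h : (List.intersperse ([] : List Char) p).flatten = p.flatten := by
    induction p with
    | nil => simp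
    | cons x t ih =>
      cases t with
      | nil => simp
      | cons y u => simp_all [List.intersperse]
  simpa [PySem.Chars.join, List.intercalate] using h

def pvBstep (out : List (List (List Char))) (line : List Char) : List (List (List Char)) :=
  if PySem.Chars.startswith (PySem.Chars.strip line) ("Attribute ".toList) then out
  else
    let s := PySem.Chars.rstrip line
    if PySem.Chars.endswith s (" _".toList) then
      let piece := PySem.Chars.rstrip (PySem.List.slice s none (some (-2))) ++ [' ']
      match out with
      | [] => [[piece]]
      | _ :: _ => out.dropLast ++ [out.getLast! ++ [piece]]
    else out ++ [[s]]

theorem pvBstep_skip (out : List (List (List Char))) (line : List Char)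
    (hk : PySem.Chars.startswith (PySem.Chars.strip line) ("Attribute ".toList) = true) :
    pvBstep out line = out := by
  simp only [pvBstep]
  rw [if_pos hk]

theorem pvBstep_cont_nil (line : List Char)
    (hk : ¬ PySem.Chars.startswith (PySem.Chars.strip line) ("Attribute ".toList) = true)
    (hc : PySem.Chars.endswith (PySem.Chars.rstrip line) (" _".toList) = true) :
    pvBstep [] line = [[pvCore (PySem.Chars.rstrip line)]] := by
  simp only [pvBstep]
  rw [if_neg hk, if_pos hc]
  simp [pvCore]

theorem pvBstep_cont_ne (out : List (List (List Char))) (line : List Char) (h : out ≠ [])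
    (hk : ¬ PySem.Chars.startswith (PySem.Chars.strip line) ("Attribute ".toList) = true)
    (hc : PySem.Chars.endswith (PySem.Chars.rstrip line) (" _".toList) = true) :
    pvBstep out line = out.dropLast ++ [out.getLast! ++ [pvCore (PySem.Chars.rstrip line)]] := by
  cases out with
  | nil => exact absurd rfl h
  | cons o os =>
    simp only [pvBstep]
    rw [if_neg hk, if_pos hc]
    simp [pvCore]

theorem pvBstep_plain (out : List (List (List Char))) (line : List Char)
    (hk : ¬ PySem.Chars.startswith (PySem.Chars.strip line) ("Attribute ".toList) = true)
    (hc : ¬ PySem.Chars.endswith (PySem.Chars.rstrip line) (" _".toList) = true) :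
    pvBstep out line = out ++ [[PySem.Chars.rstrip line]] := by
  simp only [pvBstep]
  rw [if_neg hk, if_neg hc]

theorem pvDecode_append_piece (out : List (List (List Char))) (h : out ≠ []) (c : List Char) :
    pvDecode (out.dropLast ++ [out.getLast! ++ [c]]) = pvMerge c (pvDecode out) := by
  rcases List.eq_nil_or_concat out with rfl | ⟨ys, y, rfl⟩
  · exact absurd rfl h
  · simp [pvDecode, pvMerge, pvJoin_nil_eq_flatten]

theorem pvDecode_snoc (out : List (List (List Char))) (s : List Char) :
    pvDecode (out ++ [[s]]) = s :: pvDecode out := by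
  simp [pvDecode, pvJoin_nil_eq_flatten]

-- B's fold over the reversed lines computes pvLogical of the filtered lines
theorem pvBfold (ls : List (List Char)) :
    pvDecode (ls.reverse.foldl pvBstep []) =
      pvLogical (ls.filter
        (fun l => !(PySem.Chars.startswith (PySem.Chars.strip l) ("Attribute ".toList)))) := by
  induction ls with
  | nil => simp [pvDecode, pvLogical]
  | cons l ls ih =>
    rw [List.reverse_cons, List.foldl_append, List.foldl_cons, List.foldl_nil]
    by_cases hk : PySem.Chars.startswith (PySem.Chars.strip l) ("Attribute ".toList) = true
    · rw [pvBstep_skip _ _ hk, List.filter_cons_of_neg (by simpa using hk)]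
      exact ih
    · rw [List.filter_cons_of_pos (by simpa using hk)]
      by_cases hc : PySem.Chars.endswith (PySem.Chars.rstrip l) (" _".toList) = true
      · simp only [pvLogical, hc, if_true]
        cases hOc : ls.reverse.foldl pvBstep [] with
        | nil =>
          have hnil : pvLogical (ls.filter
              (fun l => !(PySem.Chars.startswith (PySem.Chars.strip l) ("Attribute ".toList)))) = [] := by
            rw [← ih, hOc]; rfl
          rw [pvBstep_cont_nil _ hk hc, hnil]
          simp [pvDecode, pvMerge, pvJoin_nil_eq_flatten]
        | cons o os =>
          rw [pvBstep_cont_ne _ _ (by simp) hk hc,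
            pvDecode_append_piece _ (by simp), ← hOc, ih]
      · simp only [pvLogical, hc, Bool.false_eq_true, if_false]
        rw [pvBstep_plain _ _ hk hc, pvDecode_snoc, ih]

-- ===== VERDICT (by name: the statement is the Claim_ definition above) =====
theorem preprocess_py_spec : Claim_equal_preprocess_py := by
  intro vba _
  show preprocess_py vba = preprocess_py_alt vba
  have hA := pvAfold ((PySem.Chars.splitlines vba.toList).filter
      (fun l => !(PySem.Chars.startswith (PySem.Chars.strip l) ("Attribute ".toList)))) [] []
  rw [List.nil_append, pvPrepend_nil] at hA
  have hB := pvBfold (PySem.Chars.splitlines vba.toList)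
  exact congrArg (List.map String.ofList) (hA.trans hB.symm)
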